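-- pv_equiv track=rewrite | github.com/ten10pi314/security | encrypt/rsa.py | get_public_key2
-- ===== SOURCE A (Python) =====
-- def gcd(x, y):
--    while(y):
--        x, y = y, x % y
--    return x
--
-- def phi(n):
--     result = 1
--     for i in range(2, n):
--         if (gcd(i, n) == 1):
--             result+=1
--     return result
--
-- def get_public_key2(n):
-- 	totient = phi(n)
-- 	i =n-1
-- 	while i >0:
-- 		if gcd(i,totient)==1:
-- 			return i
-- 		i-=1
-- 	raise "Co-prime not found exception"
-- ===== SOURCE B (Python) =====
-- def _gcd(x, y):
--     return x if y == 0 else _gcd(y, x % y)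
--
-- def _phi(n):
--     # Euler's totient by trial-division factorization: O(sqrt(n))
--     result = n
--     m = n
--     p = 2
--     while p * p <= m:
--         if m % p == 0:
--             while m % p == 0:
--                 m //= p
--             result -= result // p
--         p += 1
--     if m > 1:
--         result -= result // m
--     return result
--
-- def get_public_key2(n):
--     totient = _phi(n)
--     for i in range(n - 1, 0, -1):
--         if _gcd(i, totient) == 1:
--             return i
--     raise ValueError("co-prime not found")
-- ===== Notes on version B (the rewrite author's own statement) =====
-- stated objective: faster
-- what changed: B computes Euler's totient by trial-division prime factorization (result -= result//p per prime factor) instead of A's coprime count via gcd over all of range(2,n), and scans down for the coprime with a for-range loop.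
import Mathlib
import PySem

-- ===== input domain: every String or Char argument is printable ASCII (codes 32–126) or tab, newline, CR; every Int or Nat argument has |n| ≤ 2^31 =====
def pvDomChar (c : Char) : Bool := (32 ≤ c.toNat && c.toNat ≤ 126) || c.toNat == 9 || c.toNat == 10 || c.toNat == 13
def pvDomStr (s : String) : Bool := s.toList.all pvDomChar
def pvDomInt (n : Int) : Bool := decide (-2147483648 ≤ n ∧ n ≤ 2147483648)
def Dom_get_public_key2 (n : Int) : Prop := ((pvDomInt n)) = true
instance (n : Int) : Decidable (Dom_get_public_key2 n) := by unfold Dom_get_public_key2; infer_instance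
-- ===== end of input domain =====

-- B replaces A's coprime-count totient with trial-division factorization.
-- (while-loops are ported as structural recursion on a fuel that provably exceeds the iteration count)

-- ===== PORT A =====

-- A's gcd: while(y): x, y = y, x % y   (|x % y| < |y|, so y.natAbs + 1 fuel suffices)
def pvGcdAGo : Nat → Int → Int → Int
  | 0, x, _ => x
  | fuel + 1, x, y => if y = 0 then x else pvGcdAGo fuel y (PySem.Int.mod x y)

def pvGcdA (x y : Int) : Int := pvGcdAGo (y.natAbs + 1) x y

-- A's phi: count of 2 ≤ i < n with gcd(i, n) == 1, starting from result = 1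
def pvPhiA (n : Int) : Int :=
  (PySem.List.pyRange 2 n 1).foldl
    (fun result i => if pvGcdA i n = 1 then result + 1 else result) 1

-- A's while-loop scanning i = n-1, n-2, … while i > 0 (i decreases by 1, so i.toNat + 1 fuel
-- suffices); 0 = the 'raise' case, unreachable under Pre_
def pvFindAGo : Nat → Int → Int → Int
  | 0, _, _ => 0
  | fuel + 1, totient, i =>
      if 0 < i then
        if pvGcdA i totient = 1 then i else pvFindAGo fuel totient (i - 1)
      else 0

def get_public_key2 (n : Int) : Int :=
  pvFindAGo ((n - 1).toNat + 1) (pvPhiA n) (n - 1)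

-- ===== PORT B =====

-- B's recursive gcd
def pvGcdBGo : Nat → Int → Int → Int
  | 0, x, _ => x
  | fuel + 1, x, y => if y = 0 then x else pvGcdBGo fuel y (PySem.Int.mod x y)

def pvGcdB (x y : Int) : Int := pvGcdBGo (y.natAbs + 1) x y

-- inner while of B's _phi: while m % p == 0: m //= p   (m shrinks, so m.toNat + 1 fuel suffices)
def pvStripGo : Nat → Int → Int → Int
  | 0, m, _ => m
  | fuel + 1, m, p =>
      if PySem.Int.mod m p = 0 then pvStripGo fuel (PySem.Int.floordiv m p) p else m

def pvStrip (m p : Int) : Int := pvStripGo (m.toNat + 1) m p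

-- outer while of B's _phi: while p * p <= m   (p increases and m never grows, so
-- (m - p).toNat + 1 fuel suffices)
def pvFacLoopGo : Nat → Int → Int → Int → Int × Int
  | 0, result, m, _ => (result, m)
  | fuel + 1, result, m, p =>
      if p * p ≤ m then
        if PySem.Int.mod m p = 0 then
          pvFacLoopGo fuel (result - PySem.Int.floordiv result p) (pvStrip m p) (p + 1)
        else
          pvFacLoopGo fuel result m (p + 1)
      else (result, m)

-- B's _phi: Euler totient via trial-division factorization
def pvPhiB (n : Int) : Int :=
  let rm := pvFacLoopGo ((n - 2).toNat + 1) n n 2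
  if 1 < rm.2 then rm.1 - PySem.Int.floordiv rm.1 rm.2 else rm.1

-- B: first hit of `for i in range(n-1, 0, -1)`; 0 = the 'raise' case, unreachable under Pre_
def get_public_key2_alt (n : Int) : Int :=
  match (PySem.List.pyRange (n - 1) 0 (-1)).find? (fun i => pvGcdB i (pvPhiB n) == 1) with
  | some i => i
  | none => 0

-- ===== PRECONDITION & SPEC =====
-- For n ≤ 1 Python A raises (its phi loop is empty and the final `raise` is reached); excluded.
def Pre_get_public_key2 (n : Int) : Prop := 2 ≤ n
instance (n : Int) : Decidable (Pre_get_public_key2 n) := by unfold Pre_get_public_key2; infer_instance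
def pvWitness_get_public_key2 : Int := 10

def Spec_get_public_key2 (n : Int) (out : Int) : Prop := out = get_public_key2_alt n
instance (n : Int) (out : Int) : Decidable (Spec_get_public_key2 n out) := by unfold Spec_get_public_key2; infer_instance

-- ===== CLAIM (what is proved, stated in full; the proofs are below) =====
def Claim_equal_get_public_key2 : Prop := ∀ (n : Int), Dom_get_public_key2 n → Pre_get_public_key2 n → Spec_get_public_key2 n (get_public_key2 n)

-- ===== LEMMAS AND PROOFS =====

-- the two gcds agree
theorem pvGcdGo_eq (fuel : Nat) : ∀ (x y : Int), pvGcdBGo fuel x y = pvGcdAGo fuel x y := by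
  induction fuel with
  | zero => intro x y; rfl
  | succ fuel ih =>
      intro x y
      simp only [pvGcdBGo, pvGcdAGo, ih]

theorem pvGcdB_eq_A (x y : Int) : pvGcdB x y = pvGcdA x y := pvGcdGo_eq (y.natAbs + 1) x y

theorem pvGcd_step (x y : Int) (hx : 0 ≤ x) (hy : 0 < y) : Int.gcd y (x % y) = Int.gcd x y := by
  have hX : x = (x.toNat : Int) := (Int.toNat_of_nonneg hx).symm
  have hY : y = (y.toNat : Int) := (Int.toNat_of_nonneg hy.le).symm
  rw [hX, hY, ← Int.natCast_mod, Int.gcd_natCast_natCast, Int.gcd_natCast_natCast]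
  conv_rhs => rw [Nat.gcd_comm]
  rw [Nat.gcd_rec y.toNat x.toNat, Nat.gcd_comm]

theorem pvGcdAGo_gcd (fuel : Nat) : ∀ (x y : Int), y.natAbs < fuel → 0 ≤ x → 0 ≤ y →
    pvGcdAGo fuel x y = (Int.gcd x y : Int) := by
  induction fuel with
  | zero => intro x y hf; omega
  | succ fuel ih =>
      intro x y hf hx hy
      simp only [pvGcdAGo]
      split
      next h =>
        subst h
        simp [Int.natAbs_of_nonneg hx]
      next h =>
        have hy0 : 0 < y := lt_of_le_of_ne hy (Ne.symm h)
        rw [PySem.Int.mod_eq_emod_of_pos hy0]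
        have hr0 : 0 ≤ x % y := Int.emod_nonneg x (by omega)
        have hrlt : x % y < y := Int.emod_lt_of_pos x hy0
        rw [ih y (x % y) (by omega) hy hr0, pvGcd_step x y hx hy0]

theorem pvGcdA_gcd (x y : Int) (hx : 0 ≤ x) (hy : 0 ≤ y) : pvGcdA x y = (Int.gcd x y : Int) :=
  pvGcdAGo_gcd (y.natAbs + 1) x y (by omega) hx hy

-- Finset card-of-filter as List countP
theorem pvCardFilter (p : ℕ → Bool) (n : ℕ) :
    ((Finset.range n).filter (fun k => p k)).card = (List.range n).countP p := by
  induction n with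
  | zero => simp
  | succ n ih =>
      by_cases h : p n <;>
        simp [Finset.range_add_one, Finset.filter_insert, h, List.range_succ,
          List.countP_append, ih]

theorem pvTotientCountP (N : ℕ) :
    N.totient = (List.range N).countP (fun k => decide (N.Coprime k)) := by
  rw [Nat.totient, ← pvCardFilter (fun k => decide (N.Coprime k)) N]
  congr 1
  apply Finset.filter_congr
  intro x _
  simp

theorem pvCountSplit (N : ℕ) (hN : 2 ≤ N) :
    (List.range N).countP (fun k => decide (N.Coprime k))
      = 1 + (List.range (N - 2)).countP (fun k => decide (Nat.gcd (k + 2) N = 1)) := by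
  have hsplit : List.range N = List.range 2 ++ (List.range (N - 2)).map (fun x => 2 + x) := by
    conv_lhs => rw [show N = 2 + (N - 2) by omega]
    exact List.range_add
  rw [hsplit, List.countP_append, List.countP_map]
  have h2 : (List.range 2).countP (fun k => decide (N.Coprime k)) = 1 := by
    have hr : List.range 2 = [0, 1] := rfl
    rw [hr]
    have h0 : ¬ N.Coprime 0 := by simp [Nat.coprime_zero_right]; omega
    simp [h0]
  rw [h2]
  congr 1
  apply List.countP_congr
  intro k _
  simp only [Function.comp]
  have hiff : N.Coprime (2 + k) ↔ Nat.gcd (k + 2) N = 1 := by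
    rw [Nat.Coprime, Nat.gcd_comm, Nat.add_comm]
  by_cases h : Nat.gcd (k + 2) N = 1 <;> simp [h, hiff]

-- A's phi computes Euler's totient
theorem pvPhiA_eq (n : Int) (hn : 2 ≤ n) : pvPhiA n = ((n.toNat).totient : Int) := by
  have hcast : n = ((n.toNat : ℕ) : Int) := (Int.toNat_of_nonneg (by omega)).symm
  have hN2 : 2 ≤ n.toNat := by omega
  unfold pvPhiA
  have hfun : (fun (result : Int) (i : Int) => if pvGcdA i n = 1 then result + 1 else result)
      = (fun acc i => if (fun i => pvGcdA i n == 1) i = true then acc + 1 else acc) := by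
    funext a i
    by_cases h : pvGcdA i n = 1 <;> simp [h]
  rw [hfun, PySem.List.foldl_count_if, PySem.List.pyRange_one, List.countP_map]
  have hrange : (n - 2).toNat = n.toNat - 2 := by omega
  rw [hrange]
  have hpred : ((fun i => pvGcdA i n == 1) ∘ (fun k : ℕ => (2 : Int) + ↑k))
      = (fun k : ℕ => decide (Nat.gcd (k + 2) n.toNat = 1)) := by
    funext k
    simp only [Function.comp]
    have h2k : ((2 : Int) + (k : Int)) = ((k + 2 : ℕ) : Int) := by push_cast; ring
    rw [h2k]
    conv_lhs => rw [hcast]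
    rw [pvGcdA_gcd _ _ (by positivity) (by positivity), Int.gcd_natCast_natCast]
    by_cases h : Nat.gcd (k + 2) n.toNat = 1
    · simp [h]
    · have h' : ((Nat.gcd (k + 2) n.toNat : ℕ) : Int) ≠ 1 := by exact_mod_cast h
      simp [h, h']
  rw [hpred, pvTotientCountP, pvCountSplit _ hN2]
  push_cast
  ring

-- the inner while strips all factors p
theorem pvStripGo_spec (fuel : Nat) : ∀ (M P : ℕ), M < fuel → 0 < M → 2 ≤ P →
    ∃ k M₂, M = P ^ k * M₂ ∧ ¬ P ∣ M₂ ∧ 0 < M₂ ∧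
      pvStripGo fuel (M : Int) (P : Int) = (M₂ : Int) ∧ (P ∣ M → 1 ≤ k) := by
  induction fuel with
  | zero => intro M P hf; omega
  | succ fuel ih =>
      intro M P hf hM hP
      simp only [pvStripGo]
      split
      next h =>
        have hdvd : P ∣ M := by
          rw [PySem.Int.mod_natCast] at h
          exact Nat.dvd_of_mod_eq_zero (by exact_mod_cast h)
        have hlt : M / P < M := Nat.div_lt_self hM (by omega)
        have hpos : 0 < M / P := Nat.div_pos (Nat.le_of_dvd hM hdvd) (by omega)
        obtain ⟨k, M₂, hEq, hnd, hpos₂, hstr, -⟩ := ih (M / P) P (by omega) hpos hP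
        refine ⟨k + 1, M₂, ?_, hnd, hpos₂, ?_, fun _ => by omega⟩
        · have hMP : M = P * (M / P) := (Nat.mul_div_cancel' hdvd).symm
          rw [pow_succ]
          calc M = P * (M / P) := hMP
            _ = P * (P ^ k * M₂) := by rw [hEq]
            _ = P ^ k * P * M₂ := by ring
        · rw [PySem.Int.floordiv_natCast]
          exact hstr
      next h =>
        have hnd : ¬ P ∣ M := by
          intro hd
          apply h
          rw [PySem.Int.mod_natCast]
          norm_cast
          obtain ⟨t, rfl⟩ := hd
          exact Nat.mul_mod_right P t
        exact ⟨0, M, by simp, hnd, hM, rfl, fun hc => absurd hc hnd⟩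

theorem pvStrip_spec (M P : ℕ) (hM : 0 < M) (hP : 2 ≤ P) :
    ∃ k M₂, M = P ^ k * M₂ ∧ ¬ P ∣ M₂ ∧ 0 < M₂ ∧
      pvStrip (M : Int) (P : Int) = (M₂ : Int) ∧ (P ∣ M → 1 ≤ k) := by
  have h := pvStripGo_spec (((M : ℕ) : Int).toNat + 1) M P (by omega) hM hP
  exact h

-- p divides m and every prime factor of m is ≥ p ⇒ p is prime
theorem pvPrimeOfMin (P M : ℕ) (hP : 2 ≤ P) (hdvd : P ∣ M)
    (hmin : ∀ q, q.Prime → q ∣ M → P ≤ q) : P.Prime := by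
  have h1 : P.minFac.Prime := Nat.minFac_prime (by omega)
  have h2 : P.minFac ∣ M := (Nat.minFac_dvd P).trans hdvd
  have h3 : P ≤ P.minFac := hmin _ h1 h2
  have h4 : P.minFac ≤ P := Nat.minFac_le (by omega)
  have h5 : P.minFac = P := le_antisymm h4 h3
  rwa [h5] at h1

theorem pvStop (M P c : ℕ) (hM : 0 < M) (hP : 2 ≤ P) (hlt : M < P * P)
    (hmin : ∀ q, q.Prime → q ∣ M → P ≤ q) (hc : ∀ q, q.Prime → q ∣ c → q < P) :
    (if 1 < ((M : ℕ) : Int) then ((c.totient * M : ℕ) : Int)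
        - PySem.Int.floordiv ((c.totient * M : ℕ) : Int) ((M : ℕ) : Int)
      else ((c.totient * M : ℕ) : Int)) = ((c * M).totient : Int) := by
  by_cases h1 : M = 1
  · subst h1
    simp
  · have hM2 : 2 ≤ M := by omega
    have hprime : M.Prime := by
      by_contra hnp
      have hsq := Nat.minFac_sq_le_self hM hnp
      have hp1 := Nat.minFac_prime h1
      have hge := hmin _ hp1 (Nat.minFac_dvd M)
      have hmm : P * P ≤ M.minFac * M.minFac := Nat.mul_le_mul hge hge
      rw [pow_two] at hsq
      omega
    have hPM : P ≤ M := hmin _ hprime dvd_rfl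
    have hndvd : ¬ M ∣ c := fun hd => absurd (hc _ hprime hd) (by omega)
    have hco : M.Coprime c := (Nat.Prime.coprime_iff_not_dvd hprime).mpr hndvd
    rw [if_pos (by omega : (1 : Int) < ((M : ℕ) : Int))]
    rw [PySem.Int.floordiv_natCast, Nat.mul_div_cancel _ hM]
    have htot : (c * M).totient = c.totient * (M - 1) := by
      rw [Nat.totient_mul hco.symm, Nat.totient_prime hprime]
    rw [htot]
    have hM1 : 1 ≤ M := hM
    push_cast [Nat.cast_sub hM1]
    ring

-- the arithmetic of `result -= result // p` at a prime factor p of M = P^k * M₂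
theorem pvFacKey (t P k M₂ : ℕ) (hk : 1 ≤ k) (hP : 0 < P) :
    t * (P ^ k * M₂) - t * (P ^ k * M₂) / P = t * (P ^ (k - 1) * (P - 1)) * M₂ := by
  have hpk : P ^ k = P ^ (k - 1) * P := by
    conv_lhs => rw [show k = (k - 1) + 1 by omega]
    rw [pow_succ]
  have hdiv : t * (P ^ k * M₂) / P = t * (P ^ (k - 1) * M₂) := by
    rw [hpk, show t * (P ^ (k - 1) * P * M₂) = P * (t * (P ^ (k - 1) * M₂)) by ring,
      Nat.mul_div_cancel_left _ hP]
  rw [hdiv]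
  have hle : t * (P ^ (k - 1) * M₂) ≤ t * (P ^ k * M₂) :=
    Nat.mul_le_mul (le_refl t)
      (Nat.mul_le_mul (Nat.pow_le_pow_right (by omega) (by omega)) (le_refl M₂))
  have hP1 : 1 ≤ P := hP
  zify [hle, hP1]
  have hpkI : ((P : Int)) ^ k = (P : Int) ^ (k - 1) * (P : Int) := by
    conv_lhs => rw [show k = (k - 1) + 1 by omega]
    rw [pow_succ]
  rw [hpkI]
  ring

-- the loop invariant of B's factorization loop
theorem pvFac_spec (fuel : Nat) : ∀ (M P c : ℕ), M - P < fuel → 0 < M → 2 ≤ P →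
    (∀ q, q.Prime → q ∣ M → P ≤ q) → (∀ q, q.Prime → q ∣ c → q < P) →
    (if 1 < (pvFacLoopGo fuel ((c.totient * M : ℕ) : Int) ((M : ℕ) : Int) ((P : ℕ) : Int)).2
      then (pvFacLoopGo fuel ((c.totient * M : ℕ) : Int) ((M : ℕ) : Int) ((P : ℕ) : Int)).1
        - PySem.Int.floordiv (pvFacLoopGo fuel ((c.totient * M : ℕ) : Int) ((M : ℕ) : Int) ((P : ℕ) : Int)).1
            (pvFacLoopGo fuel ((c.totient * M : ℕ) : Int) ((M : ℕ) : Int) ((P : ℕ) : Int)).2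
      else (pvFacLoopGo fuel ((c.totient * M : ℕ) : Int) ((M : ℕ) : Int) ((P : ℕ) : Int)).1)
      = ((c * M).totient : Int) := by
  induction fuel with
  | zero => intro M P c hf; omega
  | succ fuel ih =>
    intro M P c hf hM hP hmin hc
    have h2p : 2 * P ≤ P * P := Nat.mul_le_mul_right P (by omega)
    simp only [pvFacLoopGo]
    by_cases hg : ((P : ℕ) : Int) * ((P : ℕ) : Int) ≤ ((M : ℕ) : Int)
    · have hPPM : P * P ≤ M := by exact_mod_cast hg
      rw [if_pos hg]
      by_cases hdvd : PySem.Int.mod ((M : ℕ) : Int) ((P : ℕ) : Int) = 0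
      · have hPdvd : P ∣ M := by
          rw [PySem.Int.mod_natCast] at hdvd
          exact Nat.dvd_of_mod_eq_zero (by exact_mod_cast hdvd)
        have hPprime : P.Prime := pvPrimeOfMin P M hP hPdvd hmin
        obtain ⟨k, M₂, hEq, hnd, hpos₂, hstr, hk1⟩ := pvStrip_spec M P hM hP
        have hk : 1 ≤ k := hk1 hPdvd
        have hPnc : ¬ P ∣ c := fun hd => absurd (hc P hPprime hd) (lt_irrefl P)
        have hcop : c.Coprime (P ^ k) :=
          ((Nat.Prime.coprime_iff_not_dvd hPprime).mpr hPnc).symm.pow_right k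
        have hres : ((c.totient * M : ℕ) : Int)
            - PySem.Int.floordiv ((c.totient * M : ℕ) : Int) ((P : ℕ) : Int)
            = (((c * P ^ k).totient * M₂ : ℕ) : Int) := by
          rw [PySem.Int.floordiv_natCast, ← Nat.cast_sub (Nat.div_le_self _ _)]
          congr 1
          rw [Nat.totient_mul hcop, Nat.totient_prime_pow hPprime hk]
          conv_lhs => rw [hEq]
          exact pvFacKey c.totient P k M₂ hk (by omega)
        rw [if_pos hdvd, hstr, hres,
          show (((P : ℕ) : Int) + 1) = (((P + 1 : ℕ)) : Int) by push_cast; ring]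
        have hM2lt : M₂ < M := by
          have h2k : 2 ≤ P ^ k := le_trans hP (Nat.le_self_pow (by omega) P)
          calc M₂ < 2 * M₂ := by omega
            _ ≤ P ^ k * M₂ := Nat.mul_le_mul_right M₂ h2k
            _ = M := hEq.symm
        have hstep := ih M₂ (P + 1) (c * P ^ k) (by omega) hpos₂ (by omega)
          (fun q hq hqd => by
            have hqM : q ∣ M := by
              rw [hEq]
              exact Dvd.dvd.mul_left hqd (P ^ k)
            have h1 := hmin q hq hqM
            have h2 : q ≠ P := fun he => hnd (he ▸ hqd)
            omega)
          (fun q hq hqd => by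
            rcases (Nat.Prime.dvd_mul hq).mp hqd with h | h
            · have := hc q hq h
              omega
            · have := (Nat.prime_dvd_prime_iff_eq hq hPprime).mp (hq.dvd_of_dvd_pow h)
              omega)
        rw [hstep, show (c * P ^ k) * M₂ = c * M by rw [hEq]; ring]
      · rw [if_neg hdvd]
        have hPndvd : ¬ P ∣ M := by
          intro hd
          apply hdvd
          rw [PySem.Int.mod_natCast]
          norm_cast
          obtain ⟨t, rfl⟩ := hd
          exact Nat.mul_mod_right P t
        rw [show (((P : ℕ) : Int) + 1) = (((P + 1 : ℕ)) : Int) by push_cast; ring]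
        exact ih M (P + 1) c (by omega) hM (by omega)
          (fun q hq hqd => by
            have h1 := hmin q hq hqd
            have h2 : q ≠ P := fun he => hPndvd (he ▸ hqd)
            omega)
          (fun q hq hqd => by
            have := hc q hq hqd
            omega)
    · rw [if_neg hg]
      have hlt : M < P * P := by
        by_contra hcon
        rw [not_lt] at hcon
        exact hg (by exact_mod_cast hcon)
      exact pvStop M P c hM hP hlt hmin hc

-- B's _phi computes Euler's totient
theorem pvPhiB_eq (n : Int) (hn : 2 ≤ n) : pvPhiB n = ((n.toNat).totient : Int) := by
  have hcast : n = ((n.toNat : ℕ) : Int) := (Int.toNat_of_nonneg (by omega)).symm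
  have h := pvFac_spec ((n - 2).toNat + 1) n.toNat 2 1 (by omega) (by omega) (by omega)
    (fun q hq _ => hq.two_le)
    (fun q _ hd => by
      have h1 := Nat.dvd_one.mp hd
      omega)
  simp only [Nat.totient_one, one_mul, Nat.cast_ofNat] at h
  unfold pvPhiB
  rw [hcast, show ((((n.toNat : ℕ) : Int) - 2).toNat + 1) = ((n - 2).toNat + 1) by omega]
  exact h

-- A's downward while-scan is B's find? over range(n-1, 0, -1)
theorem pvFindGo_eq (fuel : Nat) : ∀ (t i : Int), i.toNat < fuel →
    pvFindAGo fuel t i = (match (PySem.List.pyRange i 0 (-1)).find? (fun j => pvGcdB j t == 1) with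
      | some j => j
      | none => 0) := by
  induction fuel with
  | zero => intro t i hf; omega
  | succ fuel ih =>
      intro t i hf
      simp only [pvFindAGo]
      split
      next hpos =>
        rw [PySem.List.pyRange_neg_one_cons hpos]
        by_cases hg : pvGcdA i t = 1
        · have hb : (pvGcdB i t == 1) = true := by
            rw [pvGcdB_eq_A]
            simp [hg]
          rw [List.find?_cons_of_pos (p := fun j => pvGcdB j t == 1) (a := i) hb, if_pos hg]
        · have hb : ¬ ((pvGcdB i t == 1) = true) := by
            rw [pvGcdB_eq_A]
            simp [hg]
          rw [List.find?_cons_of_neg (p := fun j => pvGcdB j t == 1) (a := i) hb, if_neg hg]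
          exact ih t (i - 1) (by omega)
      next hpos =>
        rw [PySem.List.pyRange_neg_one_eq_nil (by omega)]
        rfl

theorem pvMain (n : Int) (hn : 2 ≤ n) : get_public_key2 n = get_public_key2_alt n := by
  unfold get_public_key2 get_public_key2_alt
  rw [pvFindGo_eq ((n - 1).toNat + 1) (pvPhiA n) (n - 1) (by omega),
    pvPhiA_eq n hn, ← pvPhiB_eq n hn]

-- ===== VERDICT (by name: the statement is the Claim_ definition above) =====
theorem get_public_key2_spec : Claim_equal_get_public_key2 := by
  intro n _ hpre
  unfold Spec_get_public_key2
  exact pvMain n hpre
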